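-- pv_equiv track=rewrite | github.com/lahomsystem/FOMS | services/request_utils.py | get_preserved_filter_args
-- ===== SOURCE A (Python) =====
-- def get_preserved_filter_args(request_args):
--     """필터링 상태를 유지하기 위한 URL 매개변수를 반환합니다."""
--     redirect_args = {}
--     preserved_params = ['search', 'status', 'region', 'page', 'sort', 'direction', 'sort_by', 'sort_order']
--     preserved_params += [k for k in request_args.keys() if k.startswith('filter_')]
--     for key in preserved_params:
--         if key in request_args:
--             redirect_args[key] = request_args.get(key)
--     return redirect_args
-- ===== SOURCE B (Python) =====
-- PRESERVED_ORDER = ('search', 'status', 'region', 'page', 'sort', 'direction', 'sort_by', 'sort_order')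
--
--
-- def get_preserved_filter_args(request_args):
--     """Single pass over request_args: partition entries into preserved-name hits
--     and filter_* entries, then assemble in A's canonical order."""
--     preserved = set(PRESERVED_ORDER)
--     found = {}
--     filters = []
--     for key, value in request_args.items():
--         if key.startswith('filter_'):
--             filters.append((key, value))
--         elif key in preserved:
--             found[key] = value
--     redirect_args = {name: found[name] for name in PRESERVED_ORDER if name in found}
--     redirect_args.update(filters)
--     return redirect_args
-- ===== Notes on version B (the rewrite author's own statement) =====
-- stated objective: alternative
-- what changed: A iterates a pre-assembled name list (8 fixed names plus a scan for filter_* keys) probing the dict for each; B makes one partitioning pass over the dict's own items, collecting preserved-name hits and filter_* entries, then assembles the result in the canonical order.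
import Mathlib
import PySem

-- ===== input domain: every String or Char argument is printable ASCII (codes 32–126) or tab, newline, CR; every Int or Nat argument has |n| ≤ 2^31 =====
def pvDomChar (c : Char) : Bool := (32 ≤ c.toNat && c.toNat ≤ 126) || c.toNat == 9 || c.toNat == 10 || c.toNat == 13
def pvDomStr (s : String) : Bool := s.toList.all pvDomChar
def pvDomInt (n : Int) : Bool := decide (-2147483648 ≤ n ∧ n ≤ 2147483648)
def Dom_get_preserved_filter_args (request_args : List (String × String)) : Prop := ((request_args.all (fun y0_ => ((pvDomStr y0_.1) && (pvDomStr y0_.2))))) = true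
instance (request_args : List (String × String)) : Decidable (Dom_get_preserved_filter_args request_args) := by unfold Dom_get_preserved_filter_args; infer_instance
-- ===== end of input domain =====

-- B replaces A's scan over a pre-assembled name list by a single partitioning pass over the
-- input dict itself, followed by a canonical-order assembly (objective: alternative decomposition).

-- the fixed preserved parameter names (shared literal; both Pythons spell this list out)
def pvPreservedNames : List String :=
  ["search", "status", "region", "page", "sort", "direction", "sort_by", "sort_order"]

-- ===== PORT A =====
def get_preserved_filter_args (request_args : List (String × String)) : List (String × String) :=
  let d := PySem.Dict.ofList request_args
  let preserved_params :=
    pvPreservedNames ++ d.keys.filter (fun k => PySem.Str.startswith k "filter_")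
  (preserved_params.foldl
      (fun r key => if d.contains key then r.insert key (d.getD key "") else r)
      (PySem.Dict.empty : PySem.Dict String String)).items

-- ===== PORT B =====
def get_preserved_filter_args_alt (request_args : List (String × String)) : List (String × String) :=
  let d := PySem.Dict.ofList request_args
  let preserved : PySem.Set String := PySem.Set.ofList pvPreservedNames
  let st := d.items.foldl
      (fun (st : PySem.Dict String String × List (String × String)) p =>
        if PySem.Str.startswith p.1 "filter_" then (st.1, st.2 ++ [p])
        else if PySem.Set.contains preserved p.1 then (st.1.insert p.1 p.2, st.2)
        else st)
      ((PySem.Dict.empty : PySem.Dict String String), [])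
  let redirect_args := pvPreservedNames.foldl
      (fun o name => if st.1.contains name then o.insert name (st.1.getD name "") else o)
      (PySem.Dict.empty : PySem.Dict String String)
  (redirect_args.update st.2).items

-- ===== PRECONDITION & SPEC =====
def Spec_get_preserved_filter_args (request_args : List (String × String)) (out : List (String × String)) : Prop := out = get_preserved_filter_args_alt request_args
instance (request_args : List (String × String)) (out : List (String × String)) : Decidable (Spec_get_preserved_filter_args request_args out) := by unfold Spec_get_preserved_filter_args; infer_instance

-- ===== CLAIM (what is proved, stated in full; the proofs are below) =====
def Claim_equal_get_preserved_filter_args : Prop := ∀ (request_args : List (String × String)), Dom_get_preserved_filter_args request_args → Spec_get_preserved_filter_args request_args (get_preserved_filter_args request_args)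

-- ===== LEMMAS AND PROOFS =====

theorem pvFixed_not_filter : ∀ k ∈ pvPreservedNames, PySem.Str.startswith k "filter_" = false := by
  decide

theorem pvFixed_nodup : pvPreservedNames.Nodup := by decide

theorem pv_items_foldl_guard (c : String → Bool) (g : String → String) :
    ∀ (ks : List String) (acc : PySem.Dict String String), ks.Nodup →
      (∀ k ∈ ks, acc.contains k = false) →
      (ks.foldl (fun r key => if c key then r.insert key (g key) else r) acc).items
        = acc.items ++ (ks.filter c).map (fun k => (k, g k)) := by
  intro ks
  induction ks with
  | nil => intro acc _ _; simp
  | cons k ks ih =>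
    intro acc hnd hfresh
    have hk : acc.contains k = false := hfresh k (List.mem_cons_self)
    obtain ⟨hkk, hnd'⟩ := List.nodup_cons.mp hnd
    rw [List.foldl_cons]
    by_cases hc : c k = true
    · have hfresh' : ∀ k' ∈ ks, (acc.insert k (g k)).contains k' = false := by
        intro k' hk'
        rw [PySem.Dict.contains_insert]
        have hne : k' ≠ k := fun h => hkk (h ▸ hk')
        simp [hne, hfresh k' (List.mem_cons_of_mem _ hk')]
      rw [if_pos hc, ih _ hnd' hfresh',
          PySem.Dict.items_insert_of_not_contains _ _ hk,
          List.filter_cons_of_pos hc, List.map_cons]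
      simp
    · rw [if_neg hc, List.filter_cons_of_neg (by simpa using hc)]
      exact ih _ hnd' (fun k' hk' => hfresh k' (List.mem_cons_of_mem _ hk'))

theorem pv_partition (pres : PySem.Set String) :
    ∀ (l : List (String × String)) (st : PySem.Dict String String × List (String × String)),
      l.foldl
        (fun (st : PySem.Dict String String × List (String × String)) p =>
          if PySem.Str.startswith p.1 "filter_" then (st.1, st.2 ++ [p])
          else if PySem.Set.contains pres p.1 then (st.1.insert p.1 p.2, st.2)
          else st) st
      = ((l.filter (fun p => !PySem.Str.startswith p.1 "filter_" && PySem.Set.contains pres p.1)).foldl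
            (fun f p => f.insert p.1 p.2) st.1,
         st.2 ++ l.filter (fun p => PySem.Str.startswith p.1 "filter_")) := by
  intro l
  induction l with
  | nil => intro st; simp
  | cons p l ih =>
    intro st
    rw [List.foldl_cons]
    by_cases hf : PySem.Str.startswith p.1 "filter_" = true
    · rw [if_pos hf, ih]
      simp only [List.filter_cons, hf, Bool.not_true, Bool.false_and, Bool.false_eq_true, if_false, if_true,
        List.append_assoc, List.singleton_append]
    · have hf' : PySem.Str.startswith p.1 "filter_" = false := eq_false_of_ne_true hf
      by_cases hp : PySem.Set.contains pres p.1 = true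
      · rw [if_neg hf, if_pos hp, ih]
        simp only [List.filter_cons, hf', hp, Bool.not_false, Bool.true_and, Bool.false_eq_true, if_false, if_true,
          List.foldl_cons]
      · rw [if_neg hf, if_neg hp, ih]
        simp only [List.filter_cons, hf', eq_false_of_ne_true hp, Bool.not_false, Bool.true_and, Bool.false_eq_true,
          if_false]

theorem pv_main (d : PySem.Dict String String) (hnd : d.keys.Nodup) :
    (((pvPreservedNames ++ d.keys.filter (fun k => PySem.Str.startswith k "filter_")).foldl
        (fun r key => if d.contains key then r.insert key (d.getD key "") else r)
        (PySem.Dict.empty : PySem.Dict String String)).items)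
    = (let preserved : PySem.Set String := PySem.Set.ofList pvPreservedNames
       let st := d.items.foldl
          (fun (st : PySem.Dict String String × List (String × String)) p =>
            if PySem.Str.startswith p.1 "filter_" then (st.1, st.2 ++ [p])
            else if PySem.Set.contains preserved p.1 then (st.1.insert p.1 p.2, st.2)
            else st)
          ((PySem.Dict.empty : PySem.Dict String String), [])
       let redirect_args := pvPreservedNames.foldl
          (fun o name => if st.1.contains name then o.insert name (st.1.getD name "") else o)
          (PySem.Dict.empty : PySem.Dict String String)
       (redirect_args.update st.2).items) := by
  simp only []
  -- names
  set F : String → Bool := fun k => PySem.Str.startswith k "filter_" with hF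
  have hitems : d.items = d.keys.map (fun k => (k, d.getD k "")) :=
    PySem.Dict.items_eq_map_keys d hnd ""
  -- === B side ===
  rw [pv_partition]
  dsimp only
  set pres : PySem.Set String := PySem.Set.ofList pvPreservedNames with hpres
  set Kf : List String := d.keys.filter (fun k => !F k && PySem.Set.contains pres k) with hKf
  set fKeys : List String := d.keys.filter F with hfKeys
  -- kept pairs / filter pairs as maps over filtered keys
  have hkept : d.items.filter (fun p => !F p.1 && PySem.Set.contains pres p.1)
      = Kf.map (fun k => (k, d.getD k "")) := by
    rw [hitems, List.filter_map]
    rfl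
  have hfilters : d.items.filter (fun p => F p.1) = fKeys.map (fun k => (k, d.getD k "")) := by
    rw [hitems, List.filter_map]
    rfl
  have hKfnd : Kf.Nodup := hnd.filter _
  have hfKnd : fKeys.Nodup := hnd.filter _
  -- found dict
  have hfound : ((d.items.filter (fun p => !F p.1 && PySem.Set.contains pres p.1)).foldl
        (fun (f : PySem.Dict String String) p => f.insert p.1 p.2) PySem.Dict.empty).items
      = Kf.map (fun k => (k, d.getD k "")) := by
    rw [hkept]
    have hstep := PySem.Dict.items_foldl_insert_fresh (Kf.map (fun k => (k, d.getD k "")))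
      Prod.fst Prod.snd PySem.Dict.empty (by intro a _; simp)
      (by simpa [List.map_map, Function.comp_def] using hKfnd)
    exact hstep.trans (by simp [Function.comp_def, show (PySem.Dict.empty : PySem.Dict String String).items = [] from rfl])
  set found : PySem.Dict String String :=
    (d.items.filter (fun p => !F p.1 && PySem.Set.contains pres p.1)).foldl
        (fun (f : PySem.Dict String String) p => f.insert p.1 p.2) PySem.Dict.empty with hfounddef
  have hfkeys : found.keys = Kf := by
    show found.items.map Prod.fst = Kf
    rw [hfound, List.map_map]
    simp [Function.comp_def]
  have hfknd : found.keys.Nodup := by rw [hfkeys]; exact hKfnd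
  -- contains / getD agreement on fixed names
  have hcont : ∀ k ∈ pvPreservedNames, found.contains k = d.contains k := by
    intro k hk
    rw [PySem.Dict.contains_eq_decide_mem_keys, PySem.Dict.contains_eq_decide_mem_keys, hfkeys]
    congr 1
    simp only [hKf, List.mem_filter, eq_iff_iff]
    constructor
    · rintro ⟨h, _⟩; exact h
    · intro h
      have hnf := pvFixed_not_filter k hk
      simp at hnf
      exact ⟨h, by simp [hF, hnf, hpres, hk]⟩
  have hgetD : ∀ k ∈ pvPreservedNames, d.contains k = true → found.getD k "" = d.getD k "" := by
    intro k hk hdk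
    have hkmem : k ∈ d.keys := by
      have := PySem.Dict.contains_eq_decide_mem_keys d k
      rw [hdk] at this
      exact of_decide_eq_true this.symm
    have hmemitems : (k, d.getD k "") ∈ found.items := by
      rw [hfound]
      exact List.mem_map_of_mem (by
        rw [hKf, List.mem_filter]
        refine ⟨hkmem, ?_⟩
        have hnf := pvFixed_not_filter k hk
        simp at hnf
        simp [hF, hnf, hpres, hk])
    exact PySem.Dict.getD_of_mem_items found hmemitems hfknd ""
  -- out dict
  rw [List.nil_append]
  set filters : List (String × String) := d.items.filter (fun p => PySem.Str.startswith p.1 "filter_") with hfiltersdef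
  have hfilters' : filters = fKeys.map (fun k => (k, d.getD k "")) := hfilters
  set out : PySem.Dict String String := pvPreservedNames.foldl
      (fun o name => if found.contains name then o.insert name (found.getD name "") else o)
      PySem.Dict.empty with houtdef
  have hcontains_of_mem : ∀ k ∈ d.keys, d.contains k = true := by
    intro k hk
    rw [PySem.Dict.contains_eq_decide_mem_keys]
    exact decide_eq_true hk
  have houtitems : out.items
      = (pvPreservedNames.filter (fun k => d.contains k)).map (fun k => (k, d.getD k "")) := by
    rw [houtdef, pv_items_foldl_guard (fun k => found.contains k) (fun k => found.getD k "")
        pvPreservedNames PySem.Dict.empty pvFixed_nodup (by intro k _; simp),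
        List.filter_congr hcont]
    rw [show (PySem.Dict.empty : PySem.Dict String String).items = [] from rfl, List.nil_append]
    refine List.map_congr_left ?_
    intro k hk
    obtain ⟨hkP, hdk⟩ := List.mem_filter.mp hk
    rw [hgetD k hkP hdk]
  have houtkeys : out.keys = pvPreservedNames.filter (fun k => d.contains k) := by
    show out.items.map Prod.fst = _
    rw [houtitems, List.map_map]
    simp [Function.comp_def]
  have hfreshout : ∀ p ∈ filters, out.contains p.1 = false := by
    intro p hp
    have hpF : PySem.Str.startswith p.1 "filter_" = true := by
      have := List.of_mem_filter hp
      simpa using this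
    rw [PySem.Dict.contains_eq_decide_mem_keys, houtkeys]
    refine decide_eq_false ?_
    intro hmem
    have hkP := (List.mem_filter.mp hmem).1
    rw [pvFixed_not_filter p.1 hkP] at hpF
    exact Bool.false_ne_true hpF
  have hfndfilters : (filters.map Prod.fst).Nodup := by
    rw [hfilters', List.map_map]
    simpa [Function.comp_def] using hfKnd
  have hupd : (out.update filters).items = out.items ++ filters := by
    show (filters.foldl (fun (f : PySem.Dict String String) p => f.insert p.1 p.2) out).items = _
    have hstep := PySem.Dict.items_foldl_insert_fresh filters Prod.fst Prod.snd out hfreshout hfndfilters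
    exact hstep.trans (by simp)
  rw [hupd]
  -- A side
  have hdisj : ∀ k ∈ pvPreservedNames, k ∉ fKeys := by
    intro k hk hmem
    have hkF := List.of_mem_filter hmem
    simp only [hF] at hkF
    rw [pvFixed_not_filter k hk] at hkF
    exact Bool.false_ne_true hkF
  have hndA : (pvPreservedNames ++ fKeys).Nodup :=
    List.Nodup.append pvFixed_nodup hfKnd (List.disjoint_left.mpr hdisj)
  rw [pv_items_foldl_guard (fun k => d.contains k) (fun k => d.getD k "")
      (pvPreservedNames ++ fKeys) PySem.Dict.empty hndA (by intro k _; simp),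
      show (PySem.Dict.empty : PySem.Dict String String).items = [] from rfl, List.nil_append,
      List.filter_append, List.map_append, houtitems,
      List.filter_eq_self.mpr (fun k hk => hcontains_of_mem k (List.mem_of_mem_filter hk)),
      ← hfilters']

-- ===== VERDICT (by name: the statement is the Claim_ definition above) =====
theorem get_preserved_filter_args_spec : Claim_equal_get_preserved_filter_args := by
  intro request_args _
  unfold Spec_get_preserved_filter_args get_preserved_filter_args get_preserved_filter_args_alt
  exact pv_main (PySem.Dict.ofList request_args) (PySem.Dict.nodup_keys_ofList request_args)
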